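-- pv_equiv track=rewrite | github.com/giovannimandel/TEC-trabalho | trabalho.py | gerar_subrotina
-- ===== SOURCE A (Python) =====
-- def gerar_subrotina(estado, simbolos_adicionais):
--     #Gera a subrotina de mover tudo pra a direta
--     subrotina = []
--
--     #Adicionando a sub-rotina de movimento com &
--     subrotina.append(f';sub-rotina de movimento com & para o estado {estado}\n')
--     subrotina.append(f'{estado} & _ r {estado}move&\n')
--     subrotina.append(f'{estado}move& _ & l {estado}\n')
--
--     # Move tudo para a direita, lembrando do estado
--     subrotina.append(f'\n;move tudo pra direita, lembrando do estado {estado}\n')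
--     subrotina.append(f'{estado} # # r moveTudo{estado}\n')
--
--     # Estado inicial da sub-rotina
--     subrotina.append(f'\n;estado inicial da subrotina\n')
--     subrotina.append(f'moveTudo{estado} 1 _ r escreve1Estado{estado}\n')
--     subrotina.append(f'moveTudo{estado} 0 _ r escreve0Estado{estado}\n')
--     for simbolo in simbolos_adicionais:
--         subrotina.append(f'moveTudo{estado} {simbolo} _ r escreve{simbolo}Estado{estado}\n')
--     subrotina.append(f'moveTudo{estado} _ _ r escreve_Estado{estado}\n')
--
--     # Estado que escreve1
--     subrotina.append(f'\n;estado que escreve1\n')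
--     subrotina.append(f'escreve1Estado{estado} 1 1 r escreve1Estado{estado}\n')
--     subrotina.append(f'escreve1Estado{estado} 0 1 r escreve0Estado{estado}\n')
--     for simbolo in simbolos_adicionais:
--         subrotina.append(f'escreve1Estado{estado} {simbolo} 1 r escreve{simbolo}Estado{estado}\n')
--     subrotina.append(f'escreve1Estado{estado} _ 1 r escreve_Estado{estado}\n')
--     subrotina.append(f'escreve1Estado{estado} & 1 r chegou&Estado{estado}\n')
--
--     # Estado que escreve0
--     subrotina.append(f'\n;estado que escreve0\n')
--     subrotina.append(f'escreve0Estado{estado} 1 0 r escreve1Estado{estado}\n')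
--     subrotina.append(f'escreve0Estado{estado} 0 0 r escreve0Estado{estado}\n')
--     for simbolo in simbolos_adicionais:
--         subrotina.append(f'escreve0Estado{estado} {simbolo} 0 r escreve{simbolo}Estado{estado}\n')
--     subrotina.append(f'escreve0Estado{estado} _ 0 r escreve_Estado{estado}\n')
--     subrotina.append(f'escreve0Estado{estado} & 0 r chegou&Estado{estado}\n')
--
--     # Estados que escrevem símbolos adicionais
--     for simbolo in simbolos_adicionais:
--         subrotina.append(f'\n;estado que escreve{simbolo}\n')
--         subrotina.append(f'escreve{simbolo}Estado{estado} 1 {simbolo} r escreve1Estado{estado}\n')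
--         subrotina.append(f'escreve{simbolo}Estado{estado} 0 {simbolo} r escreve0Estado{estado}\n')
--         for s in simbolos_adicionais:
--             subrotina.append(f'escreve{simbolo}Estado{estado} {s} {simbolo} r escreve{s}Estado{estado}\n')
--         subrotina.append(f'escreve{simbolo}Estado{estado} _ {simbolo} r escreve_Estado{estado}\n')
--         subrotina.append(f'escreve{simbolo}Estado{estado} & {simbolo} r chegou&Estado{estado}\n')
--
--     # Estado que escreve_
--     subrotina.append(f'\n;estado que escreve_\n')
--     subrotina.append(f'escreve_Estado{estado} 1 _ r escreve1Estado{estado}\n')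
--     subrotina.append(f'escreve_Estado{estado} 0 _ r escreve0Estado{estado}\n')
--     for simbolo in simbolos_adicionais:
--         subrotina.append(f'escreve_Estado{estado} {simbolo} _ r escreve{simbolo}Estado{estado}\n')
--     subrotina.append(f'escreve_Estado{estado} _ _ r escreve_Estado{estado}\n')
--     subrotina.append(f'escreve_Estado{estado} & _ r chegou&Estado{estado}\n')
--
--     # Quando chegou&, volta pro início da fita
--     subrotina.append(f'\n;quando chegou&, volta pro inicio da fita\n')
--     subrotina.append(f'chegou&Estado{estado} * & l voltaInicio{estado}\n')
--     subrotina.append(f'voltaInicio{estado} 1 1 l voltaInicio{estado}\n')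
--     subrotina.append(f'voltaInicio{estado} 0 0 l voltaInicio{estado}\n')
--     for simbolo in simbolos_adicionais:
--         subrotina.append(f'voltaInicio{estado} {simbolo} {simbolo} l voltaInicio{estado}\n')
--     subrotina.append(f'voltaInicio{estado} _ _ l voltaInicio{estado}\n')
--     subrotina.append(f'voltaInicio{estado} # # r {estado}\n')
--
--     return subrotina
-- ===== SOURCE B (Python) =====
-- def gerar_subrotina(estado, simbolos_adicionais):
--     # Same transition table, generated from one ordered list of written symbols
--     escritos = ['1', '0', *simbolos_adicionais, '_']
--     sub = []
--     sub.append(f';sub-rotina de movimento com & para o estado {estado}\n')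
--     sub.append(f'{estado} & _ r {estado}move&\n')
--     sub.append(f'{estado}move& _ & l {estado}\n')
--     sub.append(f'\n;move tudo pra direita, lembrando do estado {estado}\n')
--     sub.append(f'{estado} # # r moveTudo{estado}\n')
--     sub.append(f'\n;estado inicial da subrotina\n')
--     for y in escritos:
--         sub.append(f'moveTudo{estado} {y} _ r escreve{y}Estado{estado}\n')
--     for x in escritos:
--         sub.append(f'\n;estado que escreve{x}\n')
--         for y in escritos:
--             sub.append(f'escreve{x}Estado{estado} {y} {x} r escreve{y}Estado{estado}\n')
--         sub.append(f'escreve{x}Estado{estado} & {x} r chegou&Estado{estado}\n')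
--     sub.append(f'\n;quando chegou&, volta pro inicio da fita\n')
--     sub.append(f'chegou&Estado{estado} * & l voltaInicio{estado}\n')
--     for y in escritos:
--         sub.append(f'voltaInicio{estado} {y} {y} l voltaInicio{estado}\n')
--     sub.append(f'voltaInicio{estado} # # r {estado}\n')
--     return sub
-- ===== Notes on version B (the rewrite author's own statement) =====
-- stated objective: simpler
-- what changed: B builds one ordered list escritos = ['1','0',*simbolos_adicionais,'_'] and generates the moveTudo lines, all 'escreve' sections (via a nested loop over escritos) and the voltaInicio lines from it, replacing A's four hand-unrolled copies of the section template and the unrolled per-symbol lines inside each.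
import Mathlib
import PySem

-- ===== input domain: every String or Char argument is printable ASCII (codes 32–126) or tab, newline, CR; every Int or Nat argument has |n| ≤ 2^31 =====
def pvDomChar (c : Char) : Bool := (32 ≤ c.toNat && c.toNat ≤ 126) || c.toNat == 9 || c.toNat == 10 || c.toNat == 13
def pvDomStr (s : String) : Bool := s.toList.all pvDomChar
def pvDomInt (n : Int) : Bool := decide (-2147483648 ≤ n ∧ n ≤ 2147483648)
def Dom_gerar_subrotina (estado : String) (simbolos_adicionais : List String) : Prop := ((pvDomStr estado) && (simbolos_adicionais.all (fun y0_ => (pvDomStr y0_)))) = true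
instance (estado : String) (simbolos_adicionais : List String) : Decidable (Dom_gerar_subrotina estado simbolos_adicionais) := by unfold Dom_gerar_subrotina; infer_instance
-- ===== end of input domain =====

-- B replaces A's four hand-unrolled 'escreve' sections (and the unrolled scanned-symbol lines
-- inside each section) by loops over one ordered list of written symbols; objective: simpler.

-- ===== PORT A =====
-- literal transliteration of A: each Python append is a '++ [·]', each 'for' loop a foldl over the same list state
def gerar_subrotina (estado : String) (simbolos_adicionais : List String) : List String :=
  let subrotina : List String := []
  let subrotina := subrotina ++ [";sub-rotina de movimento com & para o estado " ++ estado ++ "\n"]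
  let subrotina := subrotina ++ [estado ++ " & _ r " ++ estado ++ "move&\n"]
  let subrotina := subrotina ++ [estado ++ "move& _ & l " ++ estado ++ "\n"]
  let subrotina := subrotina ++ ["\n;move tudo pra direita, lembrando do estado " ++ estado ++ "\n"]
  let subrotina := subrotina ++ [estado ++ " # # r moveTudo" ++ estado ++ "\n"]
  let subrotina := subrotina ++ ["\n;estado inicial da subrotina\n"]
  let subrotina := subrotina ++ ["moveTudo" ++ estado ++ " 1 _ r escreve1Estado" ++ estado ++ "\n"]
  let subrotina := subrotina ++ ["moveTudo" ++ estado ++ " 0 _ r escreve0Estado" ++ estado ++ "\n"]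
  let subrotina := simbolos_adicionais.foldl (fun acc simbolo =>
    acc ++ ["moveTudo" ++ estado ++ " " ++ simbolo ++ " _ r escreve" ++ simbolo ++ "Estado" ++ estado ++ "\n"]) subrotina
  let subrotina := subrotina ++ ["moveTudo" ++ estado ++ " _ _ r escreve_Estado" ++ estado ++ "\n"]
  let subrotina := subrotina ++ ["\n;estado que escreve1\n"]
  let subrotina := subrotina ++ ["escreve1Estado" ++ estado ++ " 1 1 r escreve1Estado" ++ estado ++ "\n"]
  let subrotina := subrotina ++ ["escreve1Estado" ++ estado ++ " 0 1 r escreve0Estado" ++ estado ++ "\n"]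
  let subrotina := simbolos_adicionais.foldl (fun acc simbolo =>
    acc ++ ["escreve1Estado" ++ estado ++ " " ++ simbolo ++ " 1 r escreve" ++ simbolo ++ "Estado" ++ estado ++ "\n"]) subrotina
  let subrotina := subrotina ++ ["escreve1Estado" ++ estado ++ " _ 1 r escreve_Estado" ++ estado ++ "\n"]
  let subrotina := subrotina ++ ["escreve1Estado" ++ estado ++ " & 1 r chegou&Estado" ++ estado ++ "\n"]
  let subrotina := subrotina ++ ["\n;estado que escreve0\n"]
  let subrotina := subrotina ++ ["escreve0Estado" ++ estado ++ " 1 0 r escreve1Estado" ++ estado ++ "\n"]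
  let subrotina := subrotina ++ ["escreve0Estado" ++ estado ++ " 0 0 r escreve0Estado" ++ estado ++ "\n"]
  let subrotina := simbolos_adicionais.foldl (fun acc simbolo =>
    acc ++ ["escreve0Estado" ++ estado ++ " " ++ simbolo ++ " 0 r escreve" ++ simbolo ++ "Estado" ++ estado ++ "\n"]) subrotina
  let subrotina := subrotina ++ ["escreve0Estado" ++ estado ++ " _ 0 r escreve_Estado" ++ estado ++ "\n"]
  let subrotina := subrotina ++ ["escreve0Estado" ++ estado ++ " & 0 r chegou&Estado" ++ estado ++ "\n"]
  let subrotina := simbolos_adicionais.foldl (fun acc simbolo =>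
    let acc := acc ++ ["\n;estado que escreve" ++ simbolo ++ "\n"]
    let acc := acc ++ ["escreve" ++ simbolo ++ "Estado" ++ estado ++ " 1 " ++ simbolo ++ " r escreve1Estado" ++ estado ++ "\n"]
    let acc := acc ++ ["escreve" ++ simbolo ++ "Estado" ++ estado ++ " 0 " ++ simbolo ++ " r escreve0Estado" ++ estado ++ "\n"]
    let acc := simbolos_adicionais.foldl (fun acc2 s =>
      acc2 ++ ["escreve" ++ simbolo ++ "Estado" ++ estado ++ " " ++ s ++ " " ++ simbolo ++ " r escreve" ++ s ++ "Estado" ++ estado ++ "\n"]) acc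
    let acc := acc ++ ["escreve" ++ simbolo ++ "Estado" ++ estado ++ " _ " ++ simbolo ++ " r escreve_Estado" ++ estado ++ "\n"]
    acc ++ ["escreve" ++ simbolo ++ "Estado" ++ estado ++ " & " ++ simbolo ++ " r chegou&Estado" ++ estado ++ "\n"]) subrotina
  let subrotina := subrotina ++ ["\n;estado que escreve_\n"]
  let subrotina := subrotina ++ ["escreve_Estado" ++ estado ++ " 1 _ r escreve1Estado" ++ estado ++ "\n"]
  let subrotina := subrotina ++ ["escreve_Estado" ++ estado ++ " 0 _ r escreve0Estado" ++ estado ++ "\n"]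
  let subrotina := simbolos_adicionais.foldl (fun acc simbolo =>
    acc ++ ["escreve_Estado" ++ estado ++ " " ++ simbolo ++ " _ r escreve" ++ simbolo ++ "Estado" ++ estado ++ "\n"]) subrotina
  let subrotina := subrotina ++ ["escreve_Estado" ++ estado ++ " _ _ r escreve_Estado" ++ estado ++ "\n"]
  let subrotina := subrotina ++ ["escreve_Estado" ++ estado ++ " & _ r chegou&Estado" ++ estado ++ "\n"]
  let subrotina := subrotina ++ ["\n;quando chegou&, volta pro inicio da fita\n"]
  let subrotina := subrotina ++ ["chegou&Estado" ++ estado ++ " * & l voltaInicio" ++ estado ++ "\n"]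
  let subrotina := subrotina ++ ["voltaInicio" ++ estado ++ " 1 1 l voltaInicio" ++ estado ++ "\n"]
  let subrotina := subrotina ++ ["voltaInicio" ++ estado ++ " 0 0 l voltaInicio" ++ estado ++ "\n"]
  let subrotina := simbolos_adicionais.foldl (fun acc simbolo =>
    acc ++ ["voltaInicio" ++ estado ++ " " ++ simbolo ++ " " ++ simbolo ++ " l voltaInicio" ++ estado ++ "\n"]) subrotina
  let subrotina := subrotina ++ ["voltaInicio" ++ estado ++ " _ _ l voltaInicio" ++ estado ++ "\n"]
  subrotina ++ ["voltaInicio" ++ estado ++ " # # r " ++ estado ++ "\n"]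

-- ===== PORT B =====
-- literal transliteration of Source B: the loops over 'escritos' become foldl over the same list state
def gerar_subrotina_alt (estado : String) (simbolos_adicionais : List String) : List String :=
  let escritos : List String := ["1", "0"] ++ simbolos_adicionais ++ ["_"]
  let sub : List String := []
  let sub := sub ++ [";sub-rotina de movimento com & para o estado " ++ estado ++ "\n"]
  let sub := sub ++ [estado ++ " & _ r " ++ estado ++ "move&\n"]
  let sub := sub ++ [estado ++ "move& _ & l " ++ estado ++ "\n"]
  let sub := sub ++ ["\n;move tudo pra direita, lembrando do estado " ++ estado ++ "\n"]
  let sub := sub ++ [estado ++ " # # r moveTudo" ++ estado ++ "\n"]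
  let sub := sub ++ ["\n;estado inicial da subrotina\n"]
  let sub := escritos.foldl (fun acc y =>
    acc ++ ["moveTudo" ++ estado ++ " " ++ y ++ " _ r escreve" ++ y ++ "Estado" ++ estado ++ "\n"]) sub
  let sub := escritos.foldl (fun acc x =>
    let acc := acc ++ ["\n;estado que escreve" ++ x ++ "\n"]
    let acc := escritos.foldl (fun acc2 y =>
      acc2 ++ ["escreve" ++ x ++ "Estado" ++ estado ++ " " ++ y ++ " " ++ x ++ " r escreve" ++ y ++ "Estado" ++ estado ++ "\n"]) acc
    acc ++ ["escreve" ++ x ++ "Estado" ++ estado ++ " & " ++ x ++ " r chegou&Estado" ++ estado ++ "\n"]) sub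
  let sub := sub ++ ["\n;quando chegou&, volta pro inicio da fita\n"]
  let sub := sub ++ ["chegou&Estado" ++ estado ++ " * & l voltaInicio" ++ estado ++ "\n"]
  let sub := escritos.foldl (fun acc y =>
    acc ++ ["voltaInicio" ++ estado ++ " " ++ y ++ " " ++ y ++ " l voltaInicio" ++ estado ++ "\n"]) sub
  sub ++ ["voltaInicio" ++ estado ++ " # # r " ++ estado ++ "\n"]

-- ===== PRECONDITION & SPEC =====
def Spec_gerar_subrotina (estado : String) (simbolos_adicionais : List String) (out : List String) : Prop := out = gerar_subrotina_alt estado simbolos_adicionais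
instance (estado : String) (simbolos_adicionais : List String) (out : List String) : Decidable (Spec_gerar_subrotina estado simbolos_adicionais out) := by unfold Spec_gerar_subrotina; infer_instance

-- ===== CLAIM (what is proved, stated in full; the proofs are below) =====
def Claim_equal_gerar_subrotina : Prop := ∀ (estado : String) (simbolos_adicionais : List String), Dom_gerar_subrotina estado simbolos_adicionais → Spec_gerar_subrotina estado simbolos_adicionais (gerar_subrotina estado simbolos_adicionais)

-- ===== LEMMAS AND PROOFS =====

theorem gerar_subrotina_eq_alt (estado : String) (simbolos_adicionais : List String) :
    gerar_subrotina estado simbolos_adicionais = gerar_subrotina_alt estado simbolos_adicionais := by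
  simp only [gerar_subrotina, gerar_subrotina_alt,
    PySem.List.foldl_append_singleton_eq_map, PySem.List.foldl_append_eq_flatMap,
    List.foldl_append, List.foldl_cons, List.foldl_nil,
    List.append_assoc, List.nil_append, List.cons_append]
  simp [String.append_assoc]

-- ===== VERDICT (by name: the statement is the Claim_ definition above) =====
theorem gerar_subrotina_spec : Claim_equal_gerar_subrotina := by
  intro estado simbolos _
  exact gerar_subrotina_eq_alt estado simbolos
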